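-- pv_equiv track=rewrite | github.com/Zengkaiqi/CP1404practical | prac_05/wimbledon.py | count_win_times
-- ===== SOURCE A (Python) =====
-- def count_win_times(winners):
--     del winners[0]
--     winners.sort()
--     winner_to_count = {}
--     for winner in winners:
--         if winner in winner_to_count:
--             winner_to_count[winner] += 1
--         else:
--             winner_to_count[winner] = 1
--     return winner_to_count
-- ===== SOURCE B (Python) =====
-- def count_win_times(winners):
--     del winners[0]
--     winners.sort()
--     result = {}
--     rest = winners
--     while rest:
--         head = rest[0]
--         k = 1
--         while k < len(rest) and rest[k] == head:
--             k += 1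
--         result[head] = k
--         rest = rest[k:]
--     return result
-- ===== Notes on version B (the rewrite author's own statement) =====
-- stated objective: alternative
-- what changed: B keeps the in-place del+sort but replaces A's per-element membership-test-and-increment dict loop with a run-length scan over the sorted list (inner loop measures each run of equal names), emitting one dict entry per consecutive run.
import Mathlib
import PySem

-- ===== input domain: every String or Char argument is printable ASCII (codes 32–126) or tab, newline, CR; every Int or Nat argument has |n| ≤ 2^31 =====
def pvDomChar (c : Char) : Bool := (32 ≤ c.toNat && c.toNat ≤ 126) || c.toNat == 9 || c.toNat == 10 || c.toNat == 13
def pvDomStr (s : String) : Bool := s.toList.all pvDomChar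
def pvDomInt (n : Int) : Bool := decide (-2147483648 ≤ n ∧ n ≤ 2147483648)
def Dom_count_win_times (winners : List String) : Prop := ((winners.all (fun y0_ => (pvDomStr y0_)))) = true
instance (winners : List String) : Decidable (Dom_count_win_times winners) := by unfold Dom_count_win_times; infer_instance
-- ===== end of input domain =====

-- B counts the sorted winners by consecutive runs (two-index scan) instead of A's per-element
-- membership-and-increment dict loop; equivalence is about the RETURN value only (both Pythons
-- mutate the argument identically: del winners[0] then in-place sort).

-- ===== PORT A =====
-- del winners[0] raises IndexError on []; excluded by Pre_, so the port uses winners.drop 1.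
def count_win_times (winners : List String) : List (String × Int) :=
  ((PySem.List.sorted (winners.drop 1) (fun x => x) false).foldl (fun d w =>
      if d.contains w then d.insert w (d.getD w 0 + 1) else d.insert w 1)
    PySem.Dict.empty).items

-- ===== PORT B =====
-- inner while: count the run of `head` at the front of `rest`, return (run length − 1, remainder)
def pvSplitRun (x : String) : List String → Nat × List String
  | [] => (0, [])
  | y :: ys => if y = x then let p := pvSplitRun x ys; (p.1 + 1, p.2) else (0, y :: ys)

theorem pvSplitRun_len (x : String) (xs : List String) :
    (pvSplitRun x xs).2.length ≤ xs.length := by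
  induction xs with
  | nil => simp [pvSplitRun]
  | cons y ys ih =>
    simp only [pvSplitRun]
    split
    · exact le_trans ih (Nat.le_succ _)
    · simp

-- outer while: one dict entry per run
def pvRuns : List String → List (String × Int)
  | [] => []
  | x :: xs =>
    let p := pvSplitRun x xs
    (x, (p.1 : Int) + 1) :: pvRuns p.2
termination_by l => l.length
decreasing_by exact Nat.lt_succ_of_le (pvSplitRun_len x xs)

def count_win_times_alt (winners : List String) : List (String × Int) :=
  pvRuns (PySem.List.sorted (winners.drop 1) (fun x => x) false)

-- ===== PRECONDITION & SPEC =====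
-- Pre_ excludes the empty list, on which A's `del winners[0]` raises IndexError.
def Pre_count_win_times (winners : List String) : Prop := 0 < winners.length
instance (winners : List String) : Decidable (Pre_count_win_times winners) := by unfold Pre_count_win_times; infer_instance
def pvWitness_count_win_times : List String := ["year", "Ann", "Bo", "Ann"]
def Spec_count_win_times (winners : List String) (out : List (String × Int)) : Prop := out = count_win_times_alt winners
instance (winners : List String) (out : List (String × Int)) : Decidable (Spec_count_win_times winners out) := by unfold Spec_count_win_times; infer_instance

-- ===== CLAIM (what is proved, stated in full; the proofs are below) =====
def Claim_equal_count_win_times : Prop := ∀ (winners : List String), Dom_count_win_times winners → Pre_count_win_times winners → Spec_count_win_times winners (count_win_times winners)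

-- ===== LEMMAS AND PROOFS =====

-- A's fold is collections.Counter
theorem pvFoldA_eq_counter (l : List String) :
    (l.foldl (fun d w =>
        if d.contains w then d.insert w (d.getD w 0 + 1) else d.insert w 1)
      PySem.Dict.empty) = PySem.Dict.counter l := by
  rw [PySem.Dict.counter_eq_foldl]
  apply PySem.List.foldl_congr_mem
  intro d w _
  by_cases h : d.contains w
  · simp [h, PySem.Dict.modify]
  · simp only [Bool.not_eq_true] at h
    simp only [h, if_neg Bool.false_ne_true, PySem.Dict.modify,
      PySem.Dict.getD_of_not_contains d 0 h, zero_add]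

theorem pvSplitRun_decomp (x : String) (xs : List String) :
    xs = List.replicate (pvSplitRun x xs).1 x ++ (pvSplitRun x xs).2 := by
  induction xs with
  | nil => rfl
  | cons y ys ih =>
    simp only [pvSplitRun]
    split
    · next h => subst h; simpa [List.replicate_succ] using ih
    · rfl

-- in a ≤-sorted list x :: xs, everything after the leading run of x differs from x
theorem pvSplitRun_not_mem (x : String) (xs : List String)
    (hp : (x :: xs).Pairwise (· ≤ ·)) : x ∉ (pvSplitRun x xs).2 := by
  induction xs with
  | nil => simp [pvSplitRun]
  | cons y ys ih =>
    simp only [pvSplitRun]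
    split
    · next h =>
      subst h
      exact ih (hp.sublist (by simp))
    · next h =>
      intro hm
      have hxy : x ≤ y := (List.pairwise_cons.mp hp).1 y (by simp)
      rcases List.mem_cons.mp hm with e | hm2
      · exact h e.symm
      · have hyx : y ≤ x :=
          (List.pairwise_cons.mp (List.pairwise_cons.mp hp).2).1 x hm2
        exact h (le_antisymm hyx hxy)

-- Set.ofList restarted from a seed disjoint from the stream just appends
theorem pvOfList_append_seed (rest : List String) (s acc : List String)
    (hd : ∀ z ∈ rest, z ∉ s) :
    rest.foldl PySem.Set.add (s ++ acc) = s ++ rest.foldl PySem.Set.add acc := by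
  induction rest generalizing acc with
  | nil => rfl
  | cons z zs ih =>
    have hz : z ∉ s := hd z (by simp)
    have hsz : s.contains z = false := by simpa using hz
    have hstep : PySem.Set.add (s ++ acc) z = s ++ PySem.Set.add acc z := by
      simp only [PySem.Set.add, PySem.Set.contains, List.contains_append, hsz,
        Bool.false_or]
      split <;> simp
    rw [List.foldl_cons, List.foldl_cons, hstep]
    exact ih _ (fun w hw => hd w (by simp [hw]))

-- the main characterisation: on a ≤-sorted list, Counter's items are the consecutive runs
theorem pvCounter_items_eq_runs (l : List String) (hp : l.Pairwise (· ≤ ·)) :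
    (PySem.Set.ofList l).map (fun k => (k, (l.count k : Int))) = pvRuns l := by
  induction hn : l.length using Nat.strong_induction_on generalizing l with
  | _ n ih =>
  match l, hp with
  | [], _ => simp [pvRuns, PySem.Set.ofList]
  | x :: xs, hp =>
    subst hn
    set p := pvSplitRun x xs with hpdef
    have hdec : xs = List.replicate p.1 x ++ p.2 := pvSplitRun_decomp x xs
    have hxn : x ∉ p.2 := pvSplitRun_not_mem x xs hp
    have hrest_sorted : p.2.Pairwise (· ≤ ·) := by
      have := hp.sublist (l₁ := p.2) (by
        conv_rhs => rw [show (x :: xs) = (x :: List.replicate p.1 x) ++ p.2 by simp [← hdec]]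
        exact List.sublist_append_right _ _)
      exact this
    -- Set.ofList (x :: xs) = x :: Set.ofList p.2
    have hset : PySem.Set.ofList (x :: xs) = x :: PySem.Set.ofList p.2 := by
      rw [PySem.Set.ofList_eq_foldl]
      rw [hdec, List.foldl_cons, List.foldl_append]
      have h1 : PySem.Set.add [] x = [x] := by simp [PySem.Set.add, PySem.Set.contains]
      have h2 : (List.replicate p.1 x).foldl PySem.Set.add [x] = [x] := by
        induction p.1 with
        | zero => rfl
        | succ k ihk =>
          rw [List.replicate_succ, List.foldl_cons]
          have : PySem.Set.add [x] x = [x] := by simp [PySem.Set.add, PySem.Set.contains]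
          rw [this, ihk]
      rw [h1, h2]
      have := pvOfList_append_seed p.2 [x] [] (by
        intro z hz hm; simp at hm; exact hxn (hm ▸ hz))
      simpa [PySem.Set.ofList_eq_foldl] using this
    rw [hset]
    rw [List.map_cons]
    have hcx : (x :: xs).count x = p.1 + 1 := by
      rw [hdec]
      simp [List.count_append,
        List.count_eq_zero.mpr hxn]
    have hcz : ∀ z ∈ PySem.Set.ofList p.2, (x :: xs).count z = p.2.count z := by
      intro z hz
      have hz2 : z ∈ p.2 := (PySem.Set.mem_ofList p.2 z).mp hz
      have hzx : z ≠ x := fun e => hxn (e ▸ hz2)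
      rw [hdec]
      simp [List.count_append, Ne.symm hzx,
        List.count_eq_zero.mpr (fun hm => hzx (List.eq_of_mem_replicate hm))]
    rw [List.map_congr_left (fun z hz => by rw [hcz z hz])]
    have hlen : p.2.length < (x :: xs).length :=
      Nat.lt_succ_of_le (pvSplitRun_len x xs)
    rw [ih p.2.length hlen p.2 hrest_sorted rfl]
    show (x, ((x :: xs).count x : Int)) :: pvRuns p.2 = pvRuns (x :: xs)
    rw [hcx]
    simp [pvRuns, ← hpdef]

-- ===== VERDICT (by name: the statement is the Claim_ definition above) =====
theorem count_win_times_spec : Claim_equal_count_win_times := by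
  intro winners _ _
  show count_win_times winners = count_win_times_alt winners
  unfold count_win_times count_win_times_alt
  rw [pvFoldA_eq_counter, PySem.Dict.items_counter]
  exact pvCounter_items_eq_runs _ (by
    simpa using PySem.List.sorted_pairwise (winners.drop 1) (fun x => x))
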